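-- pv_equiv track=rewrite | github.com/catalystneuro/find_reuse | classify_usage.py | citation_matches_ref
-- ===== SOURCE A (Python) =====
-- def citation_matches_ref(citation_text: str, ref_num: str) -> bool:
--     """
--     Check if citation text includes ref_num, handling ranges like [1-5].
--
--     Args:
--         citation_text: The matched citation text (e.g., "[48-52]", "[1,2,3]")
--         ref_num: The reference number to check for (e.g., "50")
--
--     Returns:
--         True if the citation includes the reference number.
--     """
--     try:
--         ref_int = int(ref_num)
--     except ValueError:
--         return False
--
--     # Remove brackets and parentheses
--     inner = citation_text.strip('[]() ')
--
--     # Split by comma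
--     parts = inner.split(',')
--     for part in parts:
--         part = part.strip()
--         if '-' in part:
--             # Range like "3-7"
--             try:
--                 range_parts = part.split('-')
--                 if len(range_parts) == 2:
--                     start, end = int(range_parts[0]), int(range_parts[1])
--                     if start <= ref_int <= end:
--                         return True
--             except ValueError:
--                 continue
--         else:
--             # Single number
--             try:
--                 if int(part) == ref_int:
--                     return True
--             except ValueError:
--                 continue
--
--     return False
-- ===== SOURCE B (Python) =====
-- def citation_matches_ref(citation_text: str, ref_num: str) -> bool:
--     """Interval-stabbing formulation: parse the comma parts into (start, end)
--     intervals, sort them by start, build the prefix maxima of the ends, and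
--     answer with a binary search for the number of intervals starting at or
--     before ref; ref is covered iff the prefix maximum there reaches ref."""
--     try:
--         ref = int(ref_num)
--     except ValueError:
--         return False
--
--     # pass 1: parse each comma part into an interval (n -> (n, n), a-b -> (a, b))
--     ivs = []
--     for raw in citation_text.strip('[]() ').split(','):
--         part = raw.strip()
--         if '-' in part:
--             fields = part.split('-')
--             if len(fields) == 2:
--                 try:
--                     ivs.append((int(fields[0]), int(fields[1])))
--                 except ValueError:
--                     pass
--         else:
--             try:
--                 n = int(part)
--             except ValueError:
--                 continue
--             ivs.append((n, n))
--
--     # pass 2: sort by start and build the running maxima of the ends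
--     ivs.sort(key=lambda iv: iv[0])
--     starts = [s for s, _ in ivs]
--     maxend = []
--     m = None
--     for _, e in ivs:
--         m = e if m is None else max(m, e)
--         maxend.append(m)
--
--     # pass 3: binary search: lo = number of intervals with start <= ref
--     lo, hi = 0, len(starts)
--     while lo < hi:
--         mid = (lo + hi) // 2
--         if starts[mid] <= ref:
--             lo = mid + 1
--         else:
--             hi = mid
--     return lo > 0 and maxend[lo - 1] >= ref
-- ===== Notes on version B (the rewrite author's own statement) =====
-- stated objective: alternative
-- what changed: A's single interleaved parse-and-early-return scan is replaced by an interval-stabbing structure: parse all (start, end) intervals, sort them by start, build the prefix maxima of the ends, and answer with a binary search for the number of intervals starting at or before ref, checking the prefix maximum there.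
import Mathlib
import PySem

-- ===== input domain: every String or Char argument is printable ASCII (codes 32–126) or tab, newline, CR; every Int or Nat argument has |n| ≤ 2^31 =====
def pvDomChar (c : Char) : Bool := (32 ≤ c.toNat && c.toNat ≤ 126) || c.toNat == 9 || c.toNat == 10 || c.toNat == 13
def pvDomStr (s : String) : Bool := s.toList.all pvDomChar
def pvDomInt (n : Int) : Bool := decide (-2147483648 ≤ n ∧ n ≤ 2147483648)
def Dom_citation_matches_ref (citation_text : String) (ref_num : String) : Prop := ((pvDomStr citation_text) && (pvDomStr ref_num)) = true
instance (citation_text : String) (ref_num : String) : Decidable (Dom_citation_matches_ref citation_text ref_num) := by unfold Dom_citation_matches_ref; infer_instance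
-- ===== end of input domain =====

-- B replaces A's linear early-return scan over the comma parts by an interval-stabbing
-- structure: parse all intervals, sort by start, build prefix maxima of the ends, and
-- answer with a binary search (objective: alternative algorithm, same observable value).

-- s.split(sep) for the nonempty literal separators used below (Str.split? is some there)
def pySplit (s sep : String) : List String := (PySem.Str.split? s sep).getD []

-- ===== PORT A =====
-- A's for-loop over the comma-split parts, with its early return on a match.
def citeLoopA : List String → Int → Bool
  | [], _ => false
  | p :: rest, refInt =>
    let part := PySem.Str.strip p
    if part.toList.contains '-' then          -- '-' in part (single-char membership)
      let rangeParts := pySplit part "-"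
      if rangeParts.length == 2 then
        match PySem.Int.ofStr? (rangeParts.getD 0 ""), PySem.Int.ofStr? (rangeParts.getD 1 "") with
        | some start, some stop =>
          if start ≤ refInt ∧ refInt ≤ stop then true else citeLoopA rest refInt
        | _, _ => citeLoopA rest refInt       -- ValueError → continue
      else citeLoopA rest refInt
    else
      match PySem.Int.ofStr? part with
      | some n => if n == refInt then true else citeLoopA rest refInt
      | none => citeLoopA rest refInt         -- ValueError → continue

def citation_matches_ref (citation_text : String) (ref_num : String) : Bool :=
  match PySem.Int.ofStr? ref_num with
  | none => false
  | some refInt =>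
    let inner := PySem.Str.stripChars citation_text "[]() "
    let parts := pySplit inner ","
    citeLoopA parts refInt

-- ===== PORT B =====
-- Source B pass 1: the body of the interval-collecting loop ('ivs.append(...)').
def pvCollectStep (ivs : List (Int × Int)) (raw : String) : List (Int × Int) :=
  let part := PySem.Str.strip raw
  if part.toList.contains '-' then
    let fields := pySplit part "-"
    if fields.length == 2 then
      match PySem.Int.ofStr? (fields.getD 0 ""), PySem.Int.ofStr? (fields.getD 1 "") with
      | some a, some b => ivs ++ [(a, b)]
      | _, _ => ivs                        -- ValueError → pass
    else ivs
  else
    match PySem.Int.ofStr? part with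
    | none => ivs                          -- ValueError → continue
    | some n => ivs ++ [(n, n)]

def pvCollect (parts : List String) : List (Int × Int) :=
  parts.foldl pvCollectStep []

-- Source B pass 3: the 'while lo < hi' binary-search loop (starts[mid] is in range there);
-- the fuel argument only bounds the iteration count (hi - lo ≤ fuel at every call).
def pvBsearch (fuel : Nat) (starts : List Int) (ref : Int) (lo hi : Nat) : Nat :=
  match fuel with
  | 0 => lo
  | fuel + 1 =>
    if lo < hi then
      let mid := (lo + hi) / 2
      if starts.getD mid 0 ≤ ref then pvBsearch fuel starts ref (mid + 1) hi
      else pvBsearch fuel starts ref lo mid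
    else lo

def citation_matches_ref_alt (citation_text : String) (ref_num : String) : Bool :=
  match PySem.Int.ofStr? ref_num with
  | none => false
  | some ref =>
    let ivs := pvCollect (pySplit (PySem.Str.stripChars citation_text "[]() ") ",")
    -- pass 2: sort by start, running maxima of the ends ('m' and 'maxend.append(m)')
    let sivs := PySem.List.sorted ivs (fun iv => iv.1)
    let starts := sivs.map (fun iv => iv.1)
    let st := sivs.foldl
      (fun (st : Option Int × List Int) iv =>
        let m := match st.1 with | none => iv.2 | some m0 => max m0 iv.2
        (some m, st.2 ++ [m])) ((none : Option Int), ([] : List Int))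
    let maxend := st.2
    let lo := pvBsearch starts.length starts ref 0 starts.length
    decide (0 < lo) && decide (ref ≤ maxend.getD (lo - 1) 0)   -- maxend[lo-1] is in range when lo > 0

-- ===== PRECONDITION & SPEC =====
def Spec_citation_matches_ref (citation_text : String) (ref_num : String) (out : Bool) : Prop := out = citation_matches_ref_alt citation_text ref_num
instance (citation_text : String) (ref_num : String) (out : Bool) : Decidable (Spec_citation_matches_ref citation_text ref_num out) := by unfold Spec_citation_matches_ref; infer_instance

-- ===== CLAIM (what is proved, stated in full; the proofs are below) =====
def Claim_equal_citation_matches_ref : Prop := ∀ (citation_text : String) (ref_num : String), Dom_citation_matches_ref citation_text ref_num → Spec_citation_matches_ref citation_text ref_num (citation_matches_ref citation_text ref_num)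

-- ===== LEMMAS AND PROOFS =====

-- What one comma part contributes, as a value: the interval it parses to (if any).
def citePartInterval (p : String) : Option (Int × Int) :=
  let part := PySem.Str.strip p
  if part.toList.contains '-' then
    match pySplit part "-" with
    | [f0, f1] =>
      match PySem.Int.ofStr? f0, PySem.Int.ofStr? f1 with
      | some a, some b => some (a, b)
      | _, _ => none
    | _ => none
  else (PySem.Int.ofStr? part).map (fun n => (n, n))

-- One loop step of A equals testing the interval parsed from that part.
lemma citeLoop_cons (p : String) (rest : List String) (r : Int) :
    citeLoopA (p :: rest) r
      = (match citePartInterval p with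
         | some se => (decide (se.1 ≤ r) && decide (r ≤ se.2)) || citeLoopA rest r
         | none => citeLoopA rest r) := by
  simp only [citeLoopA, citePartInterval]
  by_cases hdash : (PySem.Str.strip p).toList.contains '-'
  · rw [if_pos hdash, if_pos hdash]
    rcases hsp : pySplit (PySem.Str.strip p) "-" with _ | ⟨f0, _ | ⟨f1, _ | rest2⟩⟩ <;>
      simp only [List.length, List.getD, List.getElem?_cons_zero, List.getElem?_cons_succ,
        Option.getD_some, beq_iff_eq] <;> try rfl
    rcases h0 : PySem.Int.ofStr? f0 with _ | a <;> rcases h1 : PySem.Int.ofStr? f1 with _ | b <;>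
      simp only [] <;> try rfl
    by_cases hle : a ≤ r ∧ r ≤ b
    · rw [if_pos hle]; simp [hle.1, hle.2]
    · rw [if_neg hle]
      have : ¬ (decide (a ≤ r) && decide (r ≤ b)) = true := by
        simp only [Bool.and_eq_true, decide_eq_true_eq]; exact hle
      simp [this]
  · rw [if_neg hdash, if_neg hdash]
    rcases hn : PySem.Int.ofStr? (PySem.Str.strip p) with _ | n <;>
      simp only [Option.map_none, Option.map_some]; try rfl
    by_cases hnr : n = r
    · subst hnr; simp
    · rw [if_neg (by simpa using hnr)]
      have : ¬ (decide (n ≤ r) && decide (r ≤ n)) = true := by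
        simp only [Bool.and_eq_true, decide_eq_true_eq]
        intro ⟨h1, h2⟩; exact hnr (le_antisymm h1 h2)
      simp [this]

lemma citeLoop_eq_any (parts : List String) (r : Int) :
    citeLoopA parts r
      = (parts.filterMap citePartInterval).any
          (fun se => decide (se.1 ≤ r) && decide (r ≤ se.2)) := by
  induction parts with
  | nil => simp [citeLoopA]
  | cons p rest ih =>
    rw [citeLoop_cons, List.filterMap_cons]
    rcases hI : citePartInterval p with _ | se <;> simp [ih]

-- One step of B's collecting loop appends the interval parsed from that part.
lemma pvCollect_step (ivs : List (Int × Int)) (raw : String) :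
    pvCollectStep ivs raw = (citePartInterval raw).elim ivs (fun iv => ivs ++ [iv]) := by
  simp only [pvCollectStep, citePartInterval]
  by_cases hdash : (PySem.Str.strip raw).toList.contains '-'
  · rw [if_pos hdash, if_pos hdash]
    rcases hsp : pySplit (PySem.Str.strip raw) "-" with _ | ⟨f0, _ | ⟨f1, _ | rest2⟩⟩ <;>
      simp only [List.length, List.getD, List.getElem?_cons_zero, List.getElem?_cons_succ,
        Option.getD_some, beq_iff_eq] <;> try rfl
    rcases h0 : PySem.Int.ofStr? f0 with _ | a <;> rcases h1 : PySem.Int.ofStr? f1 with _ | b <;> rfl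
  · rw [if_neg hdash, if_neg hdash]
    rcases hn : PySem.Int.ofStr? (PySem.Str.strip raw) with _ | n <;> rfl

-- An append-one-optional-value loop is a filterMap.
lemma foldl_append_optional {α β : Type} (f : List β → α → List β) (g : α → Option β)
    (hf : ∀ acc x, f acc x = (g x).elim acc (fun v => acc ++ [v])) :
    ∀ (l : List α) (acc : List β), l.foldl f acc = acc ++ l.filterMap g := by
  intro l
  induction l with
  | nil => intro acc; simp
  | cons x t ih =>
    intro acc
    rw [List.foldl_cons, hf, List.filterMap_cons]
    rcases h : g x with _ | v
    · simp [ih]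
    · simp [ih]

-- B's collecting loop is the filterMap of the per-part parser.
set_option maxHeartbeats 1000000 in
lemma pvCollect_eq_filterMap (parts : List String) :
    pvCollect parts = parts.filterMap citePartInterval := by
  unfold pvCollect
  simpa using foldl_append_optional pvCollectStep citePartInterval pvCollect_step parts []

-- The mathematical shape of Source B's running-maximum list.
def pvPrefmax : Option Int → List (Int × Int) → List Int
  | _, [] => []
  | m0, iv :: t =>
    let m := match m0 with | none => iv.2 | some m0' => max m0' iv.2
    m :: pvPrefmax (some m) t

lemma pvFold_maxend (ivs : List (Int × Int)) (m : Option Int) (acc : List Int) :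
    (ivs.foldl
      (fun (st : Option Int × List Int) iv =>
        let m := match st.1 with | none => iv.2 | some m0 => max m0 iv.2
        (some m, st.2 ++ [m])) (m, acc)).2 = acc ++ pvPrefmax m ivs := by
  induction ivs generalizing m acc with
  | nil => simp [pvPrefmax]
  | cons iv t ih => simp [pvPrefmax, ih]

-- pvPrefmax once the carried maximum exists.
def pvPrefmaxS (m : Int) : List (Int × Int) → List Int
  | [] => []
  | iv :: t => max m iv.2 :: pvPrefmaxS (max m iv.2) t

lemma pvPrefmax_some_eq (m : Int) (l : List (Int × Int)) :
    pvPrefmax (some m) l = pvPrefmaxS m l := by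
  induction l generalizing m with
  | nil => rfl
  | cons iv t ih => simp [pvPrefmax, pvPrefmaxS, ih]

lemma pvPrefmaxS_getD_iff : ∀ (l : List (Int × Int)) (m : Int) (k : Nat),
    k < l.length → ∀ x : Int,
    ((x ≤ (pvPrefmaxS m l).getD k 0)
      ↔ (x ≤ m ∨ ∃ i, i < l.length ∧ i ≤ k ∧ x ≤ (l.getD i (0, 0)).2)) := by
  intro l
  induction l with
  | nil => intro m k hk x; simp at hk
  | cons iv t ih =>
    intro m k hk x
    match k with
    | 0 =>
      have h0 : (pvPrefmaxS m (iv :: t)).getD 0 0 = max m iv.2 := by simp [pvPrefmaxS]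
      rw [h0, le_max_iff]
      constructor
      · rintro (hm | he)
        · exact Or.inl hm
        · exact Or.inr ⟨0, by simp, Nat.le_refl 0, by simpa using he⟩
      · rintro (hm | ⟨i, hilt, hile, hx⟩)
        · exact Or.inl hm
        · have : i = 0 := by omega
          subst this
          exact Or.inr (by simpa using hx)
    | k + 1 =>
      have hk' : k < t.length := by simpa using hk
      have hstep : (pvPrefmaxS m (iv :: t)).getD (k + 1) 0
          = (pvPrefmaxS (max m iv.2) t).getD k 0 := by simp [pvPrefmaxS]
      rw [hstep, ih (max m iv.2) k hk' x, le_max_iff]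
      constructor
      · rintro ((hm | he) | ⟨i, hilt, hile, hx⟩)
        · exact Or.inl hm
        · exact Or.inr ⟨0, by simp, by omega, by simpa using he⟩
        · exact Or.inr ⟨i + 1, by simpa using hilt, by omega, by simpa using hx⟩
      · rintro (hm | ⟨i, hilt, hile, hx⟩)
        · exact Or.inl (Or.inl hm)
        · match i with
          | 0 => exact Or.inl (Or.inr (by simpa using hx))
          | i + 1 =>
            exact Or.inr ⟨i, by simpa using hilt, by omega, by simpa using hx⟩

-- x reaches the k-th running maximum iff it reaches some end at index ≤ k.
lemma pvPrefmax_getD_iff (ivs : List (Int × Int)) (k : Nat) (hk : k < ivs.length) (x : Int) :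
    (x ≤ (pvPrefmax none ivs).getD k 0)
      ↔ ∃ i, i < ivs.length ∧ i ≤ k ∧ x ≤ (ivs.getD i (0, 0)).2 := by
  match ivs, hk with
  | iv :: t, hk =>
    have hbr : pvPrefmax none (iv :: t) = iv.2 :: pvPrefmaxS iv.2 t := by
      simp [pvPrefmax, pvPrefmax_some_eq]
    rw [hbr]
    match k, hk with
    | 0, hk =>
      simp only [List.getD_cons_zero]
      constructor
      · intro hx; exact ⟨0, by simp, Nat.le_refl 0, by simpa using hx⟩
      · rintro ⟨i, hilt, hile, hx⟩
        have : i = 0 := by omega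
        subst this
        simpa using hx
    | k + 1, hk =>
      have hk' : k < t.length := by simpa using hk
      rw [List.getD_cons_succ, pvPrefmaxS_getD_iff t iv.2 k hk' x]
      constructor
      · rintro (he | ⟨i, hilt, hile, hx⟩)
        · exact ⟨0, by simp, by omega, by simpa using he⟩
        · exact ⟨i + 1, by simpa using hilt, by omega, by simpa using hx⟩
      · rintro ⟨i, hilt, hile, hx⟩
        match i with
        | 0 => exact Or.inl (by simpa using hx)
        | i + 1 => exact Or.inr ⟨i, by simpa using hilt, by omega, by simpa using hx⟩

-- Postcondition of Source B's binary-search loop on a start-sorted list.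
lemma pvBsearch_post (starts : List Int) (ref : Int)
    (mono : ∀ p q, p ≤ q → q < starts.length → starts.getD p 0 ≤ starts.getD q 0) :
    ∀ fuel lo hi, hi - lo ≤ fuel → lo ≤ hi → hi ≤ starts.length →
    (∀ i, i < lo → starts.getD i 0 ≤ ref) →
    (∀ i, hi ≤ i → i < starts.length → ref < starts.getD i 0) →
    lo ≤ pvBsearch fuel starts ref lo hi ∧ pvBsearch fuel starts ref lo hi ≤ hi ∧
    (∀ i, i < pvBsearch fuel starts ref lo hi → starts.getD i 0 ≤ ref) ∧
    (∀ i, pvBsearch fuel starts ref lo hi ≤ i → i < starts.length → ref < starts.getD i 0) := by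
  intro fuel
  induction fuel with
  | zero =>
    intro lo hi hfu hlh hhn h1 h2
    have hhl : hi = lo := by omega
    simp only [pvBsearch]
    exact ⟨Nat.le_refl _, hlh, h1, fun i hli hin => h2 i (by omega) hin⟩
  | succ f ihf =>
    intro lo hi hfu hlh hhn h1 h2
    simp only [pvBsearch]
    by_cases h : lo < hi
    · rw [if_pos h]
      have hmlt : (lo + hi) / 2 < hi := by omega
      have hmge : lo ≤ (lo + hi) / 2 := by omega
      by_cases hcmp : starts.getD ((lo + hi) / 2) 0 ≤ ref
      · rw [if_pos hcmp]
        have h1' : ∀ i, i < (lo + hi) / 2 + 1 → starts.getD i 0 ≤ ref := by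
          intro i hi'
          exact le_trans (mono i ((lo + hi) / 2) (by omega) (by omega)) hcmp
        obtain ⟨ha, hb, hc, hd⟩ := ihf ((lo + hi) / 2 + 1) hi (by omega) (by omega) hhn h1' h2
        exact ⟨by omega, hb, hc, hd⟩
      · rw [if_neg hcmp]
        have h2' : ∀ i, (lo + hi) / 2 ≤ i → i < starts.length → ref < starts.getD i 0 := by
          intro i hmi hin
          exact lt_of_lt_of_le (lt_of_not_ge hcmp) (mono ((lo + hi) / 2) i hmi hin)
        obtain ⟨ha, hb, hc, hd⟩ := ihf lo ((lo + hi) / 2) (by omega) (by omega) (by omega) h1 h2'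
        exact ⟨ha, by omega, hc, hd⟩
    · rw [if_neg h]
      exact ⟨Nat.le_refl _, hlh, h1, fun i hli hin => h2 i (by omega) hin⟩

-- ===== VERDICT (by name: the statement is the Claim_ definition above) =====
theorem citation_matches_ref_spec : Claim_equal_citation_matches_ref := by
  intro ct rn _
  unfold Spec_citation_matches_ref citation_matches_ref citation_matches_ref_alt
  rcases PySem.Int.ofStr? rn with _ | r
  · rfl
  · simp only [citeLoop_eq_any, ← pvCollect_eq_filterMap]
    generalize pvCollect (pySplit (PySem.Str.stripChars ct "[]() ") ",") = ivs
    set sivs := PySem.List.sorted ivs (fun iv => iv.1) with hsivs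
    set starts := List.map (fun iv => iv.1) sivs with hstarts
    rw [pvFold_maxend]
    simp only [List.nil_append]
    set L := pvBsearch starts.length starts r 0 starts.length with hL
    have hperm : sivs.Perm ivs := PySem.List.sorted_perm ivs (fun iv => iv.1) false
    rw [← hperm.any_eq]
    have hlen : starts.length = sivs.length := by simp [hstarts]
    have hget : ∀ i, i < sivs.length → starts.getD i 0 = (sivs.getD i (0, 0)).1 := by
      intro i h
      rw [List.getD_eq_getElem _ _ (by omega : i < starts.length),
          List.getD_eq_getElem _ _ h]
      simp [hstarts]
    have hmono : ∀ p q, p ≤ q → q < starts.length → starts.getD p 0 ≤ starts.getD q 0 := by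
      intro p q hpq hq
      have hq' : q < sivs.length := by omega
      rw [List.getD_eq_getElem _ _ hq, List.getD_eq_getElem _ _ (by omega : p < starts.length)]
      simp only [hstarts, List.getElem_map]
      exact PySem.List.key_sorted_getElem_mono ivs (fun iv => iv.1) hpq hq'
    obtain ⟨hA, hB, hC, hD⟩ := pvBsearch_post starts r hmono starts.length 0 starts.length
      (by omega) (Nat.zero_le _) (Nat.le_refl _)
      (fun i hi => absurd hi (Nat.not_lt_zero i))
      (fun i h h' => absurd (Nat.lt_of_le_of_lt h h') (lt_irrefl _))
    rw [Bool.eq_iff_iff]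
    simp only [List.any_eq_true, Bool.and_eq_true, decide_eq_true_eq]
    constructor
    · rintro ⟨iv, hmem, hc1, hc2⟩
      obtain ⟨i, hi, hieq⟩ := List.mem_iff_getElem.mp hmem
      have hiL : i < L := by
        by_contra hnot
        have hd := hD i (by omega) (by omega)
        rw [hget i hi, List.getD_eq_getElem _ _ hi, hieq] at hd
        omega
      refine ⟨by omega, ?_⟩
      rw [pvPrefmax_getD_iff sivs (L - 1) (by omega) r]
      exact ⟨i, hi, by omega, by rw [List.getD_eq_getElem _ _ hi, hieq]; exact hc2⟩
    · rintro ⟨hLpos, hle⟩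
      rw [pvPrefmax_getD_iff sivs (L - 1) (by omega) r] at hle
      obtain ⟨i, hi, hik, hx⟩ := hle
      have hiL : i < L := by omega
      refine ⟨sivs.getD i (0, 0), ?_, ?_, hx⟩
      · rw [List.getD_eq_getElem _ _ hi]; exact List.getElem_mem _
      · have hs := hC i hiL
        rw [hget i hi] at hs
        exact hs
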